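-- pv_equiv track=rewrite | github.com/dluschan/olymp | technocup/2019/elimination_round_1/c.gold.py | check
-- ===== SOURCE A (Python) =====
-- def check(s, k):
--     if len(s) == 0:
--         return True
--     for i in range(len(s)):
--         if sum(s[:i+1]) == k:
--             return check(s[i+1:], k)
--         elif sum(s[:i+1]) > k:
--             return False
--     return False
-- ===== SOURCE B (Python) =====
-- def check(s, k):
--     # Single pass: running segment sum, reset when it hits k, fail as soon as it exceeds k.
--     acc = 0
--     complete = True
--     for x in s:
--         acc += x
--         if acc == k:
--             acc = 0
--             complete = True
--         elif acc > k:
--             return False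
--         else:
--             complete = False
--     return complete
-- ===== Notes on version B (the rewrite author's own statement) =====
-- stated objective: faster
-- what changed: Replaced the recursive scan that recomputes sum(s[:i+1]) for every prefix with a single pass keeping a running segment sum that resets on hitting k and fails on exceeding it.
import Mathlib
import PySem

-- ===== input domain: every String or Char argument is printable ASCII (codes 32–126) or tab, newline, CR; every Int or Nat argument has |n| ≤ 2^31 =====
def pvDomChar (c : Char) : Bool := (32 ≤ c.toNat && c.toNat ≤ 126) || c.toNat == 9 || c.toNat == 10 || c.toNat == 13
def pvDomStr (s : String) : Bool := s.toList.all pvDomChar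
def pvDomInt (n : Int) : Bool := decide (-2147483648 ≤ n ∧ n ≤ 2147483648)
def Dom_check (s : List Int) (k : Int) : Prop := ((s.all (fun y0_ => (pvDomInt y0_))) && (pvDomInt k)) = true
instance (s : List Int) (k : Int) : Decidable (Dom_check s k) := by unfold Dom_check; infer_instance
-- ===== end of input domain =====

-- B replaces A's recursive scan with recomputed prefix sums by one O(n) pass with a running segment sum (faster).


-- ===== PORT A =====
-- Python's s[:i+1] / s[i+1:] with i ≥ 0 are exactly List.take (i+1) / List.drop (i+1); sum → List.sum.
-- A's recursion (check ↔ its for-loop) is written as ONE structural recursion on a fuel counter, with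
-- check's 'if len == 0: return True' inlined at the recursive call site; 2*len fuel always suffices
-- (proved below), so the fuel guard never changes the computed value.
def checkLoopGo : Nat → List Int → Int → Nat → Bool
  | 0, _, _, _ => false
  | fuel+1, s, k, i =>
    if i < s.length then
      if (s.take (i+1)).sum == k then
        -- recursive call check(s[i+1:], k), empty test inlined
        if (s.drop (i+1)).length == 0 then true else checkLoopGo fuel (s.drop (i+1)) k 0
      else if (s.take (i+1)).sum > k then false
      else checkLoopGo fuel s k (i+1)
    else false

def check (s : List Int) (k : Int) : Bool :=
  if s.length == 0 then true else checkLoopGo (2*s.length) s k 0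

-- ===== PORT B =====
-- the 'for x in s' loop of B, carrying the running sum acc and the flag complete
def checkAltGo (s : List Int) (k : Int) (acc : Int) (complete : Bool) : Bool :=
  match s with
  | [] => complete
  | x :: rest =>
    let acc' := acc + x
    if acc' == k then checkAltGo rest k 0 true
    else if acc' > k then false
    else checkAltGo rest k acc' false

def check_alt (s : List Int) (k : Int) : Bool := checkAltGo s k 0 true

-- ===== PRECONDITION & SPEC =====
def Spec_check (s : List Int) (k : Int) (out : Bool) : Prop := out = check_alt s k
instance (s : List Int) (k : Int) (out : Bool) : Decidable (Spec_check s k out) := by unfold Spec_check; infer_instance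

-- ===== CLAIM (what is proved, stated in full; the proofs are below) =====
def Claim_equal_check : Prop := ∀ (s : List Int) (k : Int), Dom_check s k → Spec_check s k (check s k)

-- ===== LEMMAS AND PROOFS =====

-- A's loop returns False once the index reaches the end, whatever fuel remains
theorem checkLoopGo_end (f : Nat) (s : List Int) (k : Int) (i : Nat) (h : ¬ i < s.length) :
    checkLoopGo f s k i = false := by
  cases f with
  | zero => rfl
  | succ f => simp [checkLoopGo, h]

-- fuel invariant: with enough fuel, A's loop from index i computes what B's single-pass loop
-- computes on the rest of the list with acc = sum of the scanned prefix of the current segment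
theorem fuel_equiv : ∀ (f : Nat) (s : List Int) (k : Int) (i : Nat) (c : Bool),
    i < s.length → 2*(s.length - i) - 1 ≤ f →
    checkLoopGo f s k i = checkAltGo (s.drop i) k ((s.take i).sum) c := by
  intro f
  induction f with
  | zero => intro s k i c hi hf; omega
  | succ f ih =>
    intro s k i c hi hf
    simp only [checkLoopGo, hi, if_true]
    have hdrop : s.drop i = s[i] :: s.drop (i+1) := List.drop_eq_getElem_cons hi
    rw [hdrop]
    simp only [checkAltGo]
    rw [← List.sum_take_succ s i hi]
    by_cases h1 : (s.take (i+1)).sum = k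
    · simp only [h1, beq_self_eq_true, if_true]
      by_cases hnil : (s.drop (i+1)).length = 0
      · have : s.drop (i+1) = [] := List.eq_nil_of_length_eq_zero hnil
        simp [this, checkAltGo]
      · have hne : ((s.drop (i+1)).length == 0) = false := by
          simp only [beq_eq_false_iff_ne, ne_eq]; omega
        simp only [hne, Bool.false_eq_true, if_false]
        have hpos : 0 < (s.drop (i+1)).length := Nat.pos_of_ne_zero hnil
        have := ih (s.drop (i+1)) k 0 true hpos
          (by simp only [List.length_drop] at *; omega)
        simpa using this
    · have h1' : ((s.take (i+1)).sum == k) = false := beq_false_of_ne h1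
      simp only [h1', if_false, Bool.false_eq_true]
      by_cases h2 : (s.take (i+1)).sum > k
      · simp [h2]
      · simp only [h2, if_false]
        by_cases h3 : i + 1 < s.length
        · exact ih s k (i+1) false h3 (by omega)
        · have hnil : s.drop (i+1) = [] := List.drop_eq_nil_of_le (by omega)
          rw [checkLoopGo_end f s k (i+1) h3, hnil]
          rfl

-- ===== VERDICT (by name: the statement is the Claim_ definition above) =====
theorem check_spec : Claim_equal_check := by
  intro s k _
  unfold Spec_check check_alt check
  by_cases hnil : s.length = 0
  · have : s = [] := List.eq_nil_of_length_eq_zero hnil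
    simp [this, checkAltGo]
  · have hne : (s.length == 0) = false := by
      simp only [beq_eq_false_iff_ne, ne_eq]; omega
    simp only [hne, Bool.false_eq_true, if_false]
    have := fuel_equiv (2*s.length) s k 0 true (Nat.pos_of_ne_zero hnil) (by omega)
    simpa using this
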